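-- pv_equiv track=rewrite | github.com/wyk18703232953/myResearch | codeComplex/data/filteredData/python/cubic/python_cubic_0107.py | build_combinations
-- ===== SOURCE A (Python) =====
-- K = 998244353
--
-- def build_combinations(max_n):
--     c = [[0] * (max_n + 1) for _ in range(max_n + 1)]
--     c[0][0] = 1
--     for i in range(1, max_n + 1):
--         c[i][0] = 1
--         for j in range(1, i):
--             c[i][j] = (c[i - 1][j] + c[i - 1][j - 1]) % K
--         c[i][i] = 1
--     return c
-- ===== SOURCE B (Python) =====
-- K = 998244353
--
-- def build_combinations(max_n):
--     size = max_n + 1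
--     table = []
--     for i in range(size):
--         row = [0] * size
--         half = i // 2
--         v = 1
--         for j in range(half + 1):
--             row[j] = v % K
--             v = v * (i - j) // (j + 1)
--         for j in range(half + 1, i + 1):
--             row[j] = row[i - j]
--         table.append(row)
--     return table
-- ===== Notes on version B (the rewrite author's own statement) =====
-- stated objective: alternative
-- what changed: B abandons the additive Pascal recurrence entirely: each row is computed independently of all other rows by the exact multiplicative closed form C(i,j+1) = C(i,j)*(i-j)//(j+1) up to the middle column, and the rest of the row is filled by the symmetry C(i,j) = C(i,i-j); entries are reduced mod K as they are written.
import Mathlib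
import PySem

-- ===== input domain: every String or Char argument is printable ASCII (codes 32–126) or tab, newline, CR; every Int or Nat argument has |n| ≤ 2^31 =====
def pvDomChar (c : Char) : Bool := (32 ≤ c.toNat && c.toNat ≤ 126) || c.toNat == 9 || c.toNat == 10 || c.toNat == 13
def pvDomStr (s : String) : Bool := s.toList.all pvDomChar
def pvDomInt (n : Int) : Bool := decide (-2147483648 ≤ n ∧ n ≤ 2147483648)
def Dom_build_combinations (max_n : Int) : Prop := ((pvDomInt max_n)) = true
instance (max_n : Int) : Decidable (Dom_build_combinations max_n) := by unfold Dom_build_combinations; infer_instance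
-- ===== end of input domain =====

-- B builds each row independently: the exact multiplicative closed form C(i,j+1) = C(i,j)*(i-j)//(j+1)
-- up to the middle column (entries reduced mod K), then mirrors by symmetry C(i,j) = C(i,i-j),
-- instead of A's additive Pascal recurrence over the previous row; same table (alternative, not faster).


-- module-level constant K
def pyK : Int := 998244353

-- ===== PORT A =====
-- c[i][j] = v  (indices in range under Pre_)
def msetA (c : List (List Int)) (i j : Int) (v : Int) : List (List Int) :=
  PySem.List.pySetD c i (PySem.List.pySetD (PySem.List.pyGetD c i []) j v)

-- c[i][j]  (indices in range under Pre_)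
def rowGet (c : List (List Int)) (i j : Int) : Int :=
  PySem.List.pyGetD (PySem.List.pyGetD c i []) j 0

def build_combinations (max_n : Int) : List (List Int) :=
  -- c = [[0] * (max_n + 1) for _ in range(max_n + 1)]
  let c := (PySem.List.pyRange 0 (max_n + 1) 1).map
      (fun _ => PySem.List.pyRepeat [(0 : Int)] (max_n + 1))
  -- c[0][0] = 1
  let c := msetA c 0 0 1
  -- for i in range(1, max_n + 1): …
  (PySem.List.pyRange 1 (max_n + 1) 1).foldl (fun c i =>
    let c := msetA c i 0 1
    let c := (PySem.List.pyRange 1 i 1).foldl (fun c j =>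
      msetA c i j (PySem.Int.mod (rowGet c (i - 1) j + rowGet c (i - 1) (j - 1)) pyK)) c
    msetA c i i 1) c

-- ===== PORT B =====
def build_combinations_alt (max_n : Int) : List (List Int) :=
  let size := max_n + 1
  (PySem.List.pyRange 0 size 1).foldl (fun table i =>
    -- row = [0] * size; half = i // 2; v = 1
    -- for j in range(half + 1): row[j] = v % K; v = v * (i - j) // (j + 1)
    -- for j in range(half + 1, i + 1): row[j] = row[i - j]
    let half := PySem.Int.floordiv i 2
    let st := (PySem.List.pyRange 0 (half + 1) 1).foldl
      (fun (st : List Int × Int) j =>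
        (PySem.List.pySetD st.1 j (PySem.Int.mod st.2 pyK),
         PySem.Int.floordiv (st.2 * (i - j)) (j + 1)))
      (PySem.List.pyRepeat [(0 : Int)] size, 1)
    let row := (PySem.List.pyRange (half + 1) (i + 1) 1).foldl
      (fun row j => PySem.List.pySetD row j (PySem.List.pyGetD row (i - j) 0)) st.1
    table ++ [row]) []

-- ===== PRECONDITION & SPEC =====
-- Pre_ excludes max_n < 0, where A raises IndexError (c[0][0] on the empty table).
def Pre_build_combinations (max_n : Int) : Prop := 0 ≤ max_n
instance (max_n : Int) : Decidable (Pre_build_combinations max_n) := by unfold Pre_build_combinations; infer_instance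
def pvWitness_build_combinations : Int := (3)

def Spec_build_combinations (max_n : Int) (out : List (List Int)) : Prop := out = build_combinations_alt max_n
instance (max_n : Int) (out : List (List Int)) : Decidable (Spec_build_combinations max_n out) := by unfold Spec_build_combinations; infer_instance

-- ===== CLAIM (what is proved, stated in full; the proofs are below) =====
def Claim_equal_build_combinations : Prop := ∀ (max_n : Int), Dom_build_combinations max_n → Pre_build_combinations max_n → Spec_build_combinations max_n (build_combinations max_n)

-- ===== LEMMAS AND PROOFS =====

-- the canonical table: pvT i j = C(i,j) mod K (this is 0 above the diagonal since C(i,j) = 0 there)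
def pvT (i j : Nat) : Int := ((Nat.choose i j : Nat) : Int) % 998244353
def pvRow (N i : Nat) : List Int := (List.range N).map (pvT i)

theorem pyK_pos : (0:Int) < pyK := by norm_num [pyK]
theorem pvT_zero (i : Nat) : pvT i 0 = 1 := by norm_num [pvT]
theorem pvT_self (i : Nat) : pvT i i = 1 := by norm_num [pvT]
theorem pvT_of_lt {i j : Nat} (h : i < j) : pvT i j = 0 := by
  simp [pvT, Nat.choose_eq_zero_of_lt h]

def pvM (N m : Nat) : List (List Int) :=
  (List.range N).map (fun t => if t ≤ m then pvRow N t else List.replicate N (0:Int))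
def pvPartial (N m t : Nat) : List Int :=
  (List.range N).map (fun j => if j = 0 then (1:Int) else if j ≤ t then pvT (m+1) j else 0)

-- generic list helpers
theorem set_map_range {α : Type} (N j : Nat) (f : Nat → α) (v : α) (_hj : j < N) :
    ((List.range N).map f).set j v = (List.range N).map (fun t => if t = j then v else f t) := by
  apply List.ext_getElem
  · simp
  · intro t h1 h2
    rw [List.getElem_set]
    simp only [List.getElem_map, List.getElem_range]
    by_cases h : j = t <;> simp [h, eq_comm]

theorem map_range_congr {α : Type} {N : Nat} {f g : Nat → α}
    (h : ∀ t, t < N → f t = g t) : (List.range N).map f = (List.range N).map g :=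
  List.map_congr_left (fun t ht => h t (List.mem_range.mp ht))

theorem getD_set_self {α : Type} (l : List α) (i : Nat) (r d : α) (h : i < l.length) :
    (l.set i r).getD i d = r := by
  simp [List.getD, h]

theorem getD_set_ne {α : Type} (l : List α) (i t : Nat) (r d : α) (h : t ≠ i) :
    (l.set i r).getD t d = l.getD t d := by
  simp [List.getD, List.getElem?_set_ne (by omega : i ≠ t)]

theorem getD_map_range' {α : Type} (N k : Nat) (f : Nat → α) (d : α) (hk : k < N) :
    ((List.range N).map f).getD k d = f k := by
  simp [List.getD, hk]

theorem msetA_natCast (c : List (List Int)) (i j : Nat) (v : Int) :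
    msetA c (i:Int) (j:Int) v = c.set i ((c.getD i []).set j v) := by
  simp [msetA]

theorem rowGet_natCast (c : List (List Int)) (i j : Nat) :
    rowGet c (i:Int) (j:Int) = (c.getD i []).getD j 0 := by
  simp [rowGet]

theorem pvM_getD (N m t : Nat) (ht : t < N) :
    (pvM N m).getD t [] = if t ≤ m then pvRow N t else List.replicate N (0:Int) := by
  exact getD_map_range' N t _ _ ht

theorem length_pvM (N m : Nat) : (pvM N m).length = N := by simp [pvM]

theorem pvPartial_zero (N m : Nat) (hN : 1 ≤ N) :
    (List.replicate N (0:Int)).set 0 1 = pvPartial N m 0 := by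
  rw [show List.replicate N (0:Int) = (List.range N).map (fun _ => (0:Int)) by
    simp [List.map_const']]
  rw [set_map_range N 0 _ 1 (by omega)]
  unfold pvPartial
  apply map_range_congr
  intro t ht
  by_cases h : t = 0 <;> simp [h]

theorem pv_inner_step (N m t : Nat) (hmN : m + 1 < N) (ht : t < m) :
    msetA ((pvM N m).set (m+1) (pvPartial N m t)) (1 + (m:Int)) (1 + (t:Int))
        (PySem.Int.mod
          (rowGet ((pvM N m).set (m+1) (pvPartial N m t)) (1 + (m:Int) - 1) (1 + (t:Int)) +
           rowGet ((pvM N m).set (m+1) (pvPartial N m t)) (1 + (m:Int) - 1) (1 + (t:Int) - 1)) pyK)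
      = (pvM N m).set (m+1) (pvPartial N m (t+1)) := by
  have e1 : (1 + (m:Int) - 1) = ((m:Nat):Int) := by ring
  have e2 : (1 + (t:Int)) = (((t+1:Nat)):Int) := by push_cast; ring
  have e3 : (1 + (t:Int) - 1) = ((t:Nat):Int) := by ring
  have e0 : (1 + (m:Int)) = (((m+1:Nat)):Int) := by push_cast; ring
  rw [e1, e3, e2, e0, msetA_natCast, rowGet_natCast, rowGet_natCast]
  have hrowm : ((pvM N m).set (m+1) (pvPartial N m t)).getD m [] = pvRow N m := by
    rw [getD_set_ne _ _ _ _ _ (by omega)]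
    rw [pvM_getD N m m (by omega)]
    simp
  rw [hrowm]
  have hr1 : (pvRow N m).getD (t+1) 0 = pvT m (t+1) := getD_map_range' N (t+1) _ _ (by omega)
  have hr2 : (pvRow N m).getD t 0 = pvT m t := getD_map_range' N t _ _ (by omega)
  rw [hr1, hr2]
  have hrowi : ((pvM N m).set (m+1) (pvPartial N m t)).getD (m+1) [] = pvPartial N m t :=
    getD_set_self _ _ _ _ (by rw [length_pvM]; omega)
  rw [hrowi, List.set_set]
  congr 1
  -- row update
  unfold pvPartial
  rw [set_map_range N (t+1) _ _ (by omega)]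
  apply map_range_congr
  intro j hj
  by_cases hjt : j = t + 1
  · subst hjt
    rw [if_pos rfl, if_neg (by omega : ¬ (t + 1 = 0)), if_pos (le_refl (t+1))]
    rw [PySem.Int.mod_eq_emod_of_pos pyK_pos]
    simp only [pvT, pyK]
    rw [← Int.add_emod, Nat.choose_succ_succ' m t]
    push_cast
    ring_nf
  · rw [if_neg hjt]
    by_cases hj0 : j = 0
    · simp [hj0]
    · simp only [if_neg hj0]
      by_cases hjle : j ≤ t
      · rw [if_pos hjle, if_pos (by omega : j ≤ t + 1)]
      · rw [if_neg hjle, if_neg (by omega : ¬ j ≤ t + 1)]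

theorem pv_inner_inv (N m : Nat) (hmN : m + 1 < N) (t : Nat) (ht : t ≤ m) :
    (List.range t).foldl (fun c (k : Nat) =>
        msetA c (1 + (m:Int)) (1 + (k:Int))
          (PySem.Int.mod
            (rowGet c (1 + (m:Int) - 1) (1 + (k:Int)) +
             rowGet c (1 + (m:Int) - 1) (1 + (k:Int) - 1)) pyK))
      ((pvM N m).set (m+1) (pvPartial N m 0))
    = (pvM N m).set (m+1) (pvPartial N m t) := by
  induction t with
  | zero => simp
  | succ t ih =>
    rw [List.range_succ, List.foldl_append, ih (by omega)]
    simp only [List.foldl_cons, List.foldl_nil]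
    exact pv_inner_step N m t hmN (by omega)

theorem pvPartial_done (N m : Nat) (hmN : m + 1 < N) :
    (pvPartial N m m).set (m+1) 1 = pvRow N (m+1) := by
  unfold pvPartial pvRow
  rw [set_map_range N (m+1) _ _ (by omega)]
  apply map_range_congr
  intro j hj
  by_cases hjm : j = m + 1
  · simp [hjm, pvT_self]
  · rw [if_neg hjm]
    by_cases hj0 : j = 0
    · simp [hj0, pvT_zero]
    · simp only [if_neg hj0]
      by_cases hjle : j ≤ m
      · rw [if_pos hjle]
      · rw [if_neg hjle, pvT_of_lt (by omega)]

theorem pvM_succ (N m : Nat) (hmN : m + 1 < N) :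
    (pvM N m).set (m+1) (pvRow N (m+1)) = pvM N (m+1) := by
  unfold pvM
  rw [set_map_range N (m+1) _ _ (by omega)]
  apply map_range_congr
  intro t htN
  by_cases h : t = m + 1
  · simp [h]
  · rw [if_neg h]
    by_cases h2 : t ≤ m
    · rw [if_pos h2, if_pos (by omega)]
    · rw [if_neg h2, if_neg (by omega)]

theorem pv_outer_step (N m : Nat) (hmN : m + 1 < N) :
    (fun c i =>
      let c := msetA c i 0 1
      let c := (PySem.List.pyRange 1 i 1).foldl (fun c j =>
        msetA c i j (PySem.Int.mod (rowGet c (i - 1) j + rowGet c (i - 1) (j - 1)) pyK)) c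
      msetA c i i 1) (pvM N m) (1 + (m:Int))
    = pvM N (m+1) := by
  simp only []
  have e0 : (1 + (m:Int)) = (((m+1:Nat)):Int) := by push_cast; ring
  have hstart : msetA (pvM N m) (1 + (m:Int)) 0 1 = (pvM N m).set (m+1) (pvPartial N m 0) := by
    rw [e0, show (0:Int) = ((0:Nat):Int) from rfl, msetA_natCast]
    rw [pvM_getD N m (m+1) (by omega), if_neg (by omega)]
    rw [pvPartial_zero N m (by omega)]
  rw [hstart]
  have hrange : PySem.List.pyRange 1 (1 + (m:Int)) 1
      = (List.range m).map (fun (k : Nat) => 1 + (k:Int)) := by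
    rw [PySem.List.pyRange_one, show (1 + (m:Int) - 1) = (m:Int) by ring]
    simp
  rw [hrange, List.foldl_map]
  rw [pv_inner_inv N m hmN m (le_refl m)]
  rw [e0, msetA_natCast]
  rw [getD_set_self _ _ _ _ (by rw [length_pvM]; omega)]
  rw [List.set_set, pvPartial_done N m hmN, pvM_succ N m hmN]

theorem pv_outer_inv (N : Nat) (m : Nat) (hm : m < N) :
    (List.range m).foldl (fun c (i' : Nat) => (fun c i =>
      let c := msetA c i 0 1
      let c := (PySem.List.pyRange 1 i 1).foldl (fun c j =>
        msetA c i j (PySem.Int.mod (rowGet c (i - 1) j + rowGet c (i - 1) (j - 1)) pyK)) c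
      msetA c i i 1) c (1 + (i':Int))) (pvM N 0)
    = pvM N m := by
  induction m with
  | zero => simp
  | succ m ih =>
    rw [List.range_succ, List.foldl_append, ih (by omega)]
    simp only [List.foldl_cons, List.foldl_nil]
    exact pv_outer_step N m (by omega)

theorem pvRow_zero (N : Nat) (hN : 1 ≤ N) :
    (List.replicate N (0:Int)).set 0 1 = pvRow N 0 := by
  rw [pvPartial_zero N 0 hN]
  unfold pvPartial pvRow
  apply map_range_congr
  intro t ht
  by_cases h : t = 0
  · simp [h, pvT_zero]
  · simp only [if_neg h, if_neg (by omega : ¬ t ≤ 0)]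
    rw [pvT_of_lt (by omega)]

theorem pv_A_eq (max_n : Int) (h : 0 ≤ max_n) :
    build_combinations max_n = (List.range (max_n + 1).toNat).map (pvRow (max_n + 1).toNat) := by
  simp only [build_combinations]
  set N := (max_n + 1).toNat with hN
  have hN1 : 1 ≤ N := by omega
  have hc0 : (PySem.List.pyRange 0 (max_n + 1) 1).map
      (fun _ => PySem.List.pyRepeat [(0 : Int)] (max_n + 1))
      = (List.range N).map (fun _ => List.replicate N (0:Int)) := by
    rw [PySem.List.pyRange_one, List.map_map]
    simp only [PySem.List.pyRepeat_singleton, Function.comp_def]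
    rw [show max_n + 1 - 0 = max_n + 1 by ring]
  rw [hc0]
  have hc1 : msetA ((List.range N).map (fun _ => List.replicate N (0:Int))) 0 0 1 = pvM N 0 := by
    rw [show (0:Int) = ((0:Nat):Int) from rfl, msetA_natCast]
    rw [getD_map_range' N 0 _ _ (by omega)]
    rw [set_map_range N 0 _ _ (by omega)]
    unfold pvM
    apply map_range_congr
    intro t ht
    by_cases ht0 : t = 0
    · rw [if_pos ht0, ht0, if_pos (le_refl 0)]
      exact pvRow_zero N hN1
    · rw [if_neg ht0, if_neg (by omega)]
      norm_num
  rw [hc1]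
  have hrange : PySem.List.pyRange 1 (max_n + 1) 1
      = (List.range (N - 1)).map (fun (k : Nat) => 1 + (k:Int)) := by
    rw [PySem.List.pyRange_one, show max_n + 1 - 1 = max_n by ring]
    congr 2
    omega
  rw [hrange, List.foldl_map, pv_outer_inv N (N - 1) (by omega)]
  unfold pvM
  apply map_range_congr
  intro t ht
  rw [if_pos (by omega)]

-- ===== B-side proof: the multiplicative inner loop builds pvRow directly =====

theorem pv_B_inner (N m : Nat) (hm : m < N) (t : Nat) (ht : t ≤ m + 1) :
    (List.range t).foldl (fun (st : List Int × Int) (k : Nat) =>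
        (PySem.List.pySetD st.1 ((k:Nat):Int) (PySem.Int.mod st.2 pyK),
         PySem.Int.floordiv (st.2 * ((m:Int) - ((k:Nat):Int))) (((k:Nat):Int) + 1)))
      ((List.range N).map (fun _ => (0:Int)), 1)
    = ((List.range N).map (fun j => if j < t then pvT m j else 0),
       ((Nat.choose m t : Nat) : Int)) := by
  induction t with
  | zero =>
    simp only [List.range_zero, List.foldl_nil, Nat.choose_zero_right, Nat.cast_one]
    refine Prod.ext ?_ rfl
    exact map_range_congr (fun t _ => by simp)
  | succ t ih =>
    rw [List.range_succ, List.foldl_append, ih (by omega)]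
    simp only [List.foldl_cons, List.foldl_nil]
    refine Prod.ext ?_ ?_
    · show PySem.List.pySetD _ ((t:Nat):Int) _ = _
      rw [PySem.List.pySetD_natCast, PySem.Int.mod_eq_emod_of_pos pyK_pos]
      rw [set_map_range N t _ _ (by omega)]
      apply map_range_congr
      intro j hj
      by_cases hjt : j = t
      · subst hjt; simp [pvT, pyK]
      · rw [if_neg hjt]
        by_cases hlt : j < t
        · rw [if_pos hlt, if_pos (by omega)]
        · rw [if_neg hlt, if_neg (by omega)]
    · show PySem.Int.floordiv (((Nat.choose m t : Nat):Int) * ((m:Int) - t)) ((t:Int) + 1)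
          = ((Nat.choose m (t+1) : Nat) : Int)
      have e1 : (m:Int) - (t:Int) = (((m - t : Nat)):Int) := by
        have : t ≤ m := by omega
        omega
      have e2 : (t:Int) + 1 = (((t + 1 : Nat)):Int) := by push_cast; ring
      rw [e1, e2, ← Nat.cast_mul, PySem.Int.floordiv_natCast]
      congr 1
      rw [← Nat.choose_succ_right_eq]
      exact Nat.mul_div_cancel _ (by omega)

theorem pvT_symm (m j : Nat) (h : j ≤ m) : pvT m (m - j) = pvT m j := by
  simp [pvT, Nat.choose_symm h]

theorem pv_B_mirror (N m : Nat) (hm : m < N) (t : Nat) (ht : t ≤ m - m/2) :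
    (List.range t).foldl (fun row (k : Nat) =>
        PySem.List.pySetD row ((((m/2:Nat)):Int) + 1 + (k:Int))
          (PySem.List.pyGetD row ((m:Int) - ((((m/2:Nat)):Int) + 1 + (k:Int))) 0))
      ((List.range N).map (fun j => if j < m/2 + 1 then pvT m j else 0))
    = (List.range N).map (fun j => if j < m/2 + 1 + t then pvT m j else 0) := by
  induction t with
  | zero => simp
  | succ t ih =>
    rw [List.range_succ, List.foldl_append, ih (by omega)]
    simp only [List.foldl_cons, List.foldl_nil]
    have h1 : m/2 + 1 + t ≤ m := by omega
    have e1 : (((m/2:Nat)):Int) + 1 + (t:Int) = (((m/2 + 1 + t : Nat)):Int) := by push_cast; ring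
    have e2 : (m:Int) - ((((m/2:Nat)):Int) + 1 + (t:Int)) = (((m - (m/2 + 1 + t) : Nat)):Int) := by
      omega
    rw [e2, e1, PySem.List.pySetD_natCast, PySem.List.pyGetD_natCast]
    rw [getD_map_range' N (m - (m/2 + 1 + t)) _ _ (by omega)]
    rw [if_pos (by omega : m - (m/2 + 1 + t) < m/2 + 1 + t), pvT_symm m (m/2 + 1 + t) h1]
    rw [set_map_range N (m/2 + 1 + t) _ _ (by omega)]
    apply map_range_congr
    intro j hj
    by_cases hjt : j = m/2 + 1 + t
    · rw [if_pos hjt, hjt, if_pos (by omega)]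
    · rw [if_neg hjt]
      by_cases hlt : j < m/2 + 1 + t
      · rw [if_pos hlt, if_pos (by omega)]
      · rw [if_neg hlt, if_neg (by omega)]

theorem pv_B_outer (n : Int) (N : Nat) (hn : n = (N:Int)) (k : Nat) (hk : k ≤ N) :
    (List.range k).foldl (fun table (m : Nat) =>
        table ++ [(PySem.List.pyRange (PySem.Int.floordiv ((m:Nat):Int) 2 + 1) (((m:Nat):Int) + 1) 1).foldl
          (fun row j => PySem.List.pySetD row j (PySem.List.pyGetD row (((m:Nat):Int) - j) 0))
          ((PySem.List.pyRange 0 (PySem.Int.floordiv ((m:Nat):Int) 2 + 1) 1).foldl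
            (fun (st : List Int × Int) j =>
              (PySem.List.pySetD st.1 j (PySem.Int.mod st.2 pyK),
               PySem.Int.floordiv (st.2 * (((m:Nat):Int) - j)) (j + 1)))
            (PySem.List.pyRepeat [(0 : Int)] n, 1)).1]) []
    = (List.range k).map (pvRow N) := by
  induction k with
  | zero => simp
  | succ k ih =>
    rw [List.range_succ, List.foldl_append, ih (by omega)]
    simp only [List.foldl_cons, List.foldl_nil]
    rw [List.map_append, List.map_singleton]
    congr 1
    have hhalf : PySem.Int.floordiv ((k:Nat):Int) 2 = (((k/2 : Nat)):Int) := by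
      exact_mod_cast PySem.Int.floordiv_natCast k 2
    rw [hhalf]
    have hrep : PySem.List.pyRepeat [(0 : Int)] n = (List.range N).map (fun _ => (0:Int)) := by
      rw [PySem.List.pyRepeat_singleton, hn]
      simp [List.map_const']
    have hrange1 : PySem.List.pyRange 0 ((((k/2:Nat)):Int) + 1) 1
        = (List.range (k/2 + 1)).map (fun (j : Nat) => ((j:Nat):Int)) := by
      rw [PySem.List.pyRange_one]
      have : ((((k/2:Nat)):Int) + 1 - 0).toNat = k/2 + 1 := by omega
      rw [this]
      simp
    have hrange2 : PySem.List.pyRange ((((k/2:Nat)):Int) + 1) (((k:Nat):Int) + 1) 1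
        = (List.range (k - k/2)).map (fun (t : Nat) => (((k/2:Nat)):Int) + 1 + (t:Int)) := by
      rw [PySem.List.pyRange_one]
      have : (((k:Nat):Int) + 1 - ((((k/2:Nat)):Int) + 1)).toNat = k - k/2 := by omega
      rw [this]
    rw [hrep, hrange1, List.foldl_map, pv_B_inner N k (by omega) (k/2 + 1) (by omega)]
    rw [hrange2, List.foldl_map]
    congr 1
    dsimp only
    rw [pv_B_mirror N k (by omega) (k - k/2) (le_refl _)]
    unfold pvRow
    apply map_range_congr
    intro j hj
    by_cases h : j < k/2 + 1 + (k - k/2)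
    · rw [if_pos h]
    · rw [if_neg h, pvT_of_lt (by omega)]

theorem pv_B_eq (max_n : Int) (h : 0 ≤ max_n) :
    build_combinations_alt max_n = (List.range (max_n + 1).toNat).map (pvRow (max_n + 1).toNat) := by
  simp only [build_combinations_alt]
  set N := (max_n + 1).toNat with hN
  have hn : max_n + 1 = (N:Int) := by omega
  have hrange : PySem.List.pyRange 0 (max_n + 1) 1
      = (List.range N).map (fun (k : Nat) => ((k:Nat):Int)) := by
    rw [PySem.List.pyRange_one, show max_n + 1 - 0 = max_n + 1 by ring, hn]
    simp
  rw [hrange, List.foldl_map]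
  exact pv_B_outer (max_n + 1) N hn N (le_refl N)

-- ===== VERDICT (by name: the statement is the Claim_ definition above) =====
theorem build_combinations_spec : Claim_equal_build_combinations := by
  intro max_n _ hpre
  unfold Spec_build_combinations
  rw [pv_A_eq max_n hpre, pv_B_eq max_n hpre]
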